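/- GENERATED by tools/from_farm_form.py from prooffarm-gif/accepted/DGifCloseFile.4/Lemmas.lean (a worked proof of the farm's unit `DGifCloseFile.4`,
   accepted by the verdict) — do not edit. -/
import Gif.Spec.AllSegs

/-!
  THE PURE LEMMAS OF `DGifCloseFile.4` (109D06H … 109D13H, dgif_lib.c:705: `GifFreeExtensions(&gif.ExtensionBlockCount,
  &gif.ExtensionBlocks)`). No machine state occurs here: memories, windows, the heap's ghost, the forest.

      seg4_Off                    what a window written between the two cuts is: one of the two cells of gif, or a window that misses
                                  gif, the private object and the cursor
      seg4_off_of_gap             a gap of the heap (`Gap0`) in the heap's region / the shadow, or in the stack below `top`, is such a window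
      seg4_off_of_stack           a stack window below `top` (the pushed return address) is such a window
      seg4_kept                   a footprint of such windows keeps everything `CloseShape` reads but the pending list's pair
      seg4_combine                the footprint of the `call`'s push, then the callee's
      seg4_shape                  THE STEP OF THE SEGMENT: `CloseShape (bare F)` and `rem` after the callee, from `CloseShape (noSaved F)`
      seg4_extsAt_push            the pending list's shape through the push of the return address (the callee's `ExtCells.shape`)
      seg4_owns_cells             what `ExtCells.owns` asks: gif and the list's objects
      seg4_owns_bare              what is left after the callee: `Owns (Hc.releaseAll …) (bare F).owned`
-/

namespace Gif.Spec.DGifCloseFile_4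
open X86 X86.User Asan ProgX.Base ProgX.Base.Spec Gif.Spec

/-- **A window written between the cuts 109D06H and 109D13H**: the count cell of gif, the pointer cell of gif, or a window that
misses gif `[gif, gif + 120)`, the private object `[pv, pv + 24936)` and the cursor `[cur, cur + 16)`. -/
def seg4_Off (gif pv cur : Nat) (w : Span) : Prop :=
  (w.lo = gif + 80 ∧ w.hi = gif + 84) ∨
  (w.lo = gif + 88 ∧ w.hi = gif + 96) ∨
  ((w.hi ≤ gif ∨ gif + 120 ≤ w.lo) ∧ (w.hi ≤ pv ∨ pv + 24936 ≤ w.lo) ∧ (w.hi ≤ cur ∨ cur + 16 ≤ w.lo))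

/-- **A gap of the heap, in the heap's region or the shadow, or in the stack below `top`** (the third kind of window of
GifFreeExtensions' post) **misses gif, the private object** (live objects of the heap: `Gap0`) **and the cursor** (a stack object at
or above `top`, below 800000H). -/
theorem seg4_off_of_gap {Hc : Heap} {mem : Mem} {gif pv cur top : Nat} {w : Span} (hok : HeapOK Hc mem)
    (hgl : Hc.Live gif 120) (hpl : Hc.Live pv 24936) (hc1 : cur + 16 ≤ 0x800000) (hc2 : top ≤ cur)
    (hgap : Gap0 Hc w) (hw : 0x800000 ≤ w.lo ∨ (0x700000 ≤ w.lo ∧ w.hi ≤ top)) : seg4_Off gif pv cur w := by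
  obtain ⟨cg, hcg⟩ := hgl
  obtain ⟨cp, hcp⟩ := hpl
  have hg := hgap _ hcg
  have hp := hgap _ hcp
  have sg := hok.size_le_cap hcg
  have sp := hok.size_le_cap hcp
  simp only at hg hp sg sp
  right
  right
  refine ⟨?_, ?_, ?_⟩
  · omega
  · omega
  · omega

/-- **A stack window below `top`** (the return address the `call` pushed) **misses gif, the private object** (at or above 800000H)
**and the cursor** (at or above `top`). -/
theorem seg4_off_of_stack {gif pv cur top : Nat} {w : Span} (hg : 0x800000 ≤ gif) (hp : 0x800000 ≤ pv) (hc2 : top ≤ cur)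
    (hw1 : w.hi ≤ top) (hw2 : top ≤ 0x800000) : seg4_Off gif pv cur w := by
  right
  right
  refine ⟨?_, ?_, ?_⟩
  · omega
  · omega
  · omega

/-- **A footprint of `seg4_Off` windows keeps everything `CloseShape` reads besides the pending list's pair** — `SColorMap`,
`Image.ColorMap`, `Private` of gif, `FileState` and `File` of the private object, the cursor; the forest has no colour map left —
**and `gif.SavedImages`** (`[gif + 72, gif + 80)`). The two cells lie inside gif: gif is another object than the private object (`hgp`) and lies above the
cursor (`hgc`). -/
theorem seg4_kept {Fc : Forest} {R : Rd} {m m' : Mem} {ws : List Span} (hs : Mem.SameExcept ws m m')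
    (hoff : ∀ w, w ∈ ws → seg4_Off Fc.gif Fc.pv R.cur w) (hscm : Fc.scm = none) (hicm : Fc.icm = none)
    (hgp : Fc.gif + 120 ≤ Fc.pv ∨ Fc.pv + 24936 ≤ Fc.gif) (hgc : R.cur + 16 ≤ Fc.gif) :
    DGifCloseFile.CloseKeptButPend Fc R m m' ∧ Mem.EqOn (Fc.gif + 72) (Fc.gif + 80) m m' := by
  have hE : ∀ lo hi, (∀ w, w ∈ ws → hi ≤ w.lo ∨ w.hi ≤ lo) → Mem.EqOn lo hi m m' := by
    intro lo hi hd
    exact hs.eqOn lo hi hd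
  refine ⟨⟨?_, ?_, ?_, ?_, ?_, ?_, ?_, ?_⟩, ?_⟩
  · apply hE
    intro w hw
    have := hoff w hw
    unfold seg4_Off at this
    omega
  · apply hE
    intro w hw
    have := hoff w hw
    unfold seg4_Off at this
    omega
  · apply hE
    intro w hw
    have := hoff w hw
    unfold seg4_Off at this
    omega
  · apply hE
    intro w hw
    have := hoff w hw
    unfold seg4_Off at this
    omega
  · apply hE
    intro w hw
    have := hoff w hw
    unfold seg4_Off at this
    omega
  · apply hE
    intro w hw
    have := hoff w hw
    unfold seg4_Off at this
    omega
  · intro o ho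
    rw [hscm] at ho
    exact absurd ho List.not_mem_nil
  · intro o ho
    rw [hicm] at ho
    exact absurd ho List.not_mem_nil
  · apply hE
    intro w hw
    have := hoff w hw
    unfold seg4_Off at this
    omega

/-- **The footprint of the `call`'s push, then the callee's**: one list of windows from the cut to the returned state. -/
theorem seg4_combine {w0 : Span} {ws : List Span} {m0 m1 m2 : Mem} (h0 : Mem.SameExcept [w0] m0 m1)
    (h1 : Mem.SameExcept ws m1 m2) : Mem.SameExcept (w0 :: ws) m0 m2 := by
  have k0 : Mem.SameExcept (w0 :: ws) m0 m1 := by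
    apply h0.mono
    intro w hw a ha1 ha2
    have ew : w = w0 := List.mem_singleton.mp hw
    subst ew
    exact ⟨w, List.mem_cons_self, ha1, ha2⟩
  have k1 : Mem.SameExcept (w0 :: ws) m1 m2 := by
    apply h1.mono
    intro w hw a ha1 ha2
    exact ⟨w, List.mem_cons_of_mem _ hw, ha1, ha2⟩
  exact k0.trans k1

/-- **THE STEP OF SEGMENT 4.** The memory `m0` at the cut 109D06H has the shape of the forest without colour maps and saved images;
the `call` pushed the return address (`w0`: a stack window below `top`, the clean stack's end; memory `m1`); GifFreeExtensions
returned with the memory `m2`: every window it wrote is one of the two cells of gif's pending list or a gap of the heap (in the heap's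
region / the shadow, or in the stack below `top`), and the two cells hold `(0, 0)`. Then `m2` has the shape of the forest without
the pending list too, and the reader's measure is as it was. -/
theorem seg4_shape {Hc : Heap} {F : Forest} {R : Rd} {m0 m1 m2 hm : Mem} {ws : List Span} {w0 : Span} {top top' : Nat}
    (hshape : CloseShape (DGifCloseFile.noSaved F) R m0) (hok : HeapOK Hc hm) (hbase : Hc.base = 0x800000)
    (howns : Owns Hc (DGifCloseFile.noSaved F).owned)
    (hc1 : R.cur + 16 ≤ 0x800000) (hc2 : top ≤ R.cur) (htop : top ≤ 0x800000) (htop' : top' ≤ top)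
    (hs0 : Mem.SameExcept [w0] m0 m1) (hw0 : w0.hi ≤ top)
    (hs1 : Mem.SameExcept ws m1 m2)
    (hws : ∀ w, w ∈ ws →
      (w.lo = F.gif + 80 ∧ w.hi = F.gif + 80 + 4) ∨
      (w.lo = F.gif + 88 ∧ w.hi = F.gif + 88 + 8) ∨
      (Gap0 Hc w ∧ (0x800000 ≤ w.lo ∨ (0x700000 ≤ w.lo ∧ w.hi ≤ top'))))
    (hblocks : rd m2 (F.gif + 88) 8 = 0) (hcount : rd m2 (F.gif + 80) 4 = 0) :
    CloseShape (DGifCloseFile.bare F) R m2 ∧ rem R m2 = rem R m0 := by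
  have hgmem : (F.gif, 120) ∈ (DGifCloseFile.noSaved F).owned := List.mem_cons_self
  have hpmem : (F.pv, 24936) ∈ (DGifCloseFile.noSaved F).owned := List.mem_cons_of_mem _ List.mem_cons_self
  have hgl : Hc.Live F.gif 120 := howns.live _ hgmem
  have hpl : Hc.Live F.pv 24936 := howns.live _ hpmem
  have hgr := hgl.range hbase hok
  have hpr := hpl.range hbase hok
  have hne : ((F.gif, 120) : Nat × Nat) ≠ (F.pv, 24936) := by
    intro heq
    have h2 := congrArg Prod.snd heq
    simp only at h2
    omega
  have hfar := howns.far hok hgmem hpmem hne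
  simp only at hfar
  have hs : Mem.SameExcept (w0 :: ws) m0 m2 := seg4_combine hs0 hs1
  have hoff : ∀ w, w ∈ w0 :: ws → seg4_Off (DGifCloseFile.noSaved F).gif (DGifCloseFile.noSaved F).pv R.cur w := by
    intro w hw
    show seg4_Off F.gif F.pv R.cur w
    rcases List.mem_cons.mp hw with ew | hin
    · subst ew
      exact seg4_off_of_stack (by omega) (by omega) hc2 hw0 htop
    · rcases hws w hin with hcell | hcell | ⟨hgap, hwhere⟩
      · left
        omega
      · right
        left
        omega
      · apply seg4_off_of_gap hok hgl hpl hc1 hc2 hgap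
        omega
  obtain ⟨hkept, hsavedEq⟩ := seg4_kept (Fc := DGifCloseFile.noSaved F) hs hoff rfl rfl
    (by show F.gif + 120 ≤ F.pv ∨ F.pv + 24936 ≤ F.gif; omega) (by show R.cur + 16 ≤ F.gif; omega)
  have hsaved : GifFileType.SavedImages m2 F.gif = 0 := by
    have h0 : GifFileType.SavedImages m0 F.gif = 0 := hshape.saved
    simp only [gfield] at h0 ⊢
    rw [hsavedEq.rd (F.gif + 72) 8 (Nat.le_refl _) (Nat.le_refl _) (by omega)]
    exact h0
  have hb : GifFileType.ExtensionBlocks m2 F.gif = 0 := by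
    simp only [gfield]
    exact hblocks
  have hc : GifFileType.ExtensionBlockCount m2 F.gif = 0 := by
    simp only [gfield]
    exact hcount
  refine ⟨?_, ?_⟩
  · exact DGifCloseFile.closeShape_noPend (F := DGifCloseFile.noSaved F) hshape hkept hsaved hb hc (by show F.gif + 120 < 2 ^ 64; omega)
      (by show F.pv + 72 < 2 ^ 64; omega) (by omega) (fun x hx => absurd hx (by simp only [reduceCtorEq, not_false_eq_true]))
      (fun x hx => absurd hx (by simp only [reduceCtorEq, not_false_eq_true]))
  · exact rem_frame hkept.cursor (by omega)

/-- **The pending list's shape through the push of the return address** (the `shape` clause of the callee's `ExtCells`, at the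
callee's entry): the store went to the stack, below 800000H; gif and the list's array lie at or above it. -/
theorem seg4_extsAt_push {ex : Option Exts} {gif : Nat} {m : Mem} (a : Word) (x : Nat)
    (h : ExtsAt ex (rd m (gif + 88) 8) (rd m (gif + 80) 4) m) (ha : a.toNat + 8 ≤ 0x800000) (hg1 : 0x800000 ≤ gif)
    (hg2 : gif + 120 ≤ 0xC00000)
    (harr : ∀ y, ex = some y → 0x800000 ≤ y.arr ∧ y.arr + 24 * y.blocks.length ≤ 0xC00000) :
    ExtsAt ex (rd (m.writeLE a 8 x) (gif + 88) 8) (rd (m.writeLE a 8 x) (gif + 80) 4) (m.writeLE a 8 x) := by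
  rw [rd_writeLE_disjoint m a 8 x (gif + 88) 8 (by omega) (by omega) (by omega)]
  rw [rd_writeLE_disjoint m a 8 x (gif + 80) 4 (by omega) (by omega) (by omega)]
  apply h.frame
  · intro o ho
    cases ex with
    | none => exact absurd ho List.not_mem_nil
    | some y =>
      have ey : o = (y.arr, 24 * y.blocks.length) := List.mem_singleton.mp ho
      subst ey
      obtain ⟨k1, k2⟩ := harr y rfl
      exact Mem.EqOn.writeLE _ _ m a 8 x (by omega) (by left; simp only; omega)
  · intro y hy
    obtain ⟨k1, k2⟩ := harr y hy
    omega

/-- **What the callee's `ExtCells.owns` asks**: gif (the holder of the two cells) and the objects of the pending list, from what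
the forest without colour maps and saved images owns. -/
theorem seg4_owns_cells {Hc : Heap} {F : Forest} (h : Owns Hc (DGifCloseFile.noSaved F).owned) :
    Owns Hc ((F.gif, 120) :: Exts.objs F.pend) := by
  apply h.sublist
  show ((F.gif, 120) :: Exts.objs F.pend).Sublist
    ((F.gif, 120) :: (F.pv, 24936) :: (Map.objs none ++ Map.objs none ++ Saved.objs none ++ Exts.objs F.pend))
  apply List.Sublist.cons_cons
  apply List.Sublist.cons
  exact List.sublist_append_right _ _

/-- **What is left after GifFreeExtensions**: the heap with every object of the pending list freed owns gif and the private object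
(`Owns.releaseAll` along `Forest.owned_pend`). -/
theorem seg4_owns_bare {Hc : Heap} {F : Forest} (h : Owns Hc (DGifCloseFile.noSaved F).owned) :
    Owns (Hc.releaseAll ((Exts.objs F.pend).map Prod.fst)) (DGifCloseFile.bare F).owned := by
  have hp := Forest.owned_pend (DGifCloseFile.noSaved F)
  have h1 : Owns Hc (Exts.objs F.pend ++ (DGifCloseFile.noSaved F).ownedButPend) := h.perm hp
  have h2 := h1.releaseAll
  have e : (DGifCloseFile.noSaved F).ownedButPend = (DGifCloseFile.bare F).owned := by
    show (F.gif, 120) :: (F.pv, 24936) :: (Map.objs none ++ Map.objs none ++ Saved.objs none) =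
      (F.gif, 120) :: (F.pv, 24936) :: (Map.objs none ++ Map.objs none ++ Saved.objs none ++ Exts.objs none)
    simp only [Map.objs, Saved.objs, Exts.objs, List.append_nil]
  rw [e] at h2
  exact h2

end Gif.Spec.DGifCloseFile_4
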